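-- pv_equiv track=rewrite | github.com/Ipshita29/100DaysOfCode | Day2/ques2.py | maxScore
-- ===== SOURCE A (Python) =====
-- def maxScore(s):
--     total_one = s.count('1')
--     left_zero = 0
--     right_one = total_one
--     max_score = 0
--     for i in range(len(s) - 1):
--         if s[i] == '0':
--             left_zero += 1
--         else:
--             right_one -= 1
--         max_score = max(max_score, left_zero + right_one)
--     return max_score
-- ===== SOURCE B (Python) =====
-- def maxScore(s):
--     # Build prefix tables first, then do a separate max-scan over them.
--     prefix_zero = [0]
--     for c in s:
--         prefix_zero.append(prefix_zero[-1] + (c == '0'))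
--     total_one = s.count('1')
--     best = 0
--     for i, z in enumerate(prefix_zero[1:len(s)], start=1):
--         best = max(best, z + total_one - (i - z))
--     return best
-- ===== Notes on version B (the rewrite author's own statement) =====
-- stated objective: alternative
-- what changed: A keeps live left-zero/right-one counters updated inside one incremental loop; B first materializes a prefix-zero-count table (plus the total-one count) and then does a separate max-scan over the table entries for split points 1..len(s)-1.
import Mathlib
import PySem

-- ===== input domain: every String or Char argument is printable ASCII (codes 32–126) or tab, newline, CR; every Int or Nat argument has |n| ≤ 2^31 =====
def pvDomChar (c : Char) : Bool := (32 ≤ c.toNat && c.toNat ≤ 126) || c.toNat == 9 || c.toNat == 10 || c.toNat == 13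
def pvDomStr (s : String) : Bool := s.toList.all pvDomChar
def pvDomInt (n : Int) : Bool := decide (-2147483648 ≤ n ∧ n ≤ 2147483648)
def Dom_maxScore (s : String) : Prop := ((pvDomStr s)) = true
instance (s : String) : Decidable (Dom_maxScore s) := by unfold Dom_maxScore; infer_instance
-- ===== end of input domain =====

-- B restructures A's single live-counter loop into two phases — build a prefix-zero table,
-- then a separate max-scan over it (objective: alternative decomposition, same cost).

-- ===== PORT A =====
-- A's loop 'for i in range(len(s)-1): … s[i] …' only reads s[i]; it is ported as a fold
-- over the chars of s[:-1] (dropLast), visiting the same characters in the same order.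
def maxScore (s : String) : Int :=
  let total_one : Int := PySem.Str.count s "1"
  let st := s.toList.dropLast.foldl
    (fun (st : Int × Int × Int) c =>
      let (left_zero, right_one, max_score) := st
      if c = '0' then
        (left_zero + 1, right_one, max max_score (left_zero + 1 + right_one))
      else
        (left_zero, right_one - 1, max max_score (left_zero + (right_one - 1))))
    (0, total_one, 0)
  st.2.2

-- ===== PORT B =====
-- The prefix-table loop 'prefix_zero.append(prefix_zero[-1] + (c == '0'))' is List.scanl;
-- 'enumerate(…, start=1)' is a fold carrying the index in the state; prefix_zero[1:len(s)] is a slice.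
def maxScore_alt (s : String) : Int :=
  let prefix_zero : List Int :=
    s.toList.scanl (fun z c => z + (if c = '0' then 1 else 0)) 0
  let total_one : Int := PySem.Str.count s "1"
  let st := (PySem.List.slice prefix_zero (some 1) (some (PySem.Str.len s))).foldl
    (fun (st : Int × Int) z => (max st.1 (z + total_one - (st.2 - z)), st.2 + 1))
    (0, 1)
  st.1

-- ===== PRECONDITION & SPEC =====
def Spec_maxScore (s : String) (out : Int) : Prop := out = maxScore_alt s
instance (s : String) (out : Int) : Decidable (Spec_maxScore s out) := by unfold Spec_maxScore; infer_instance

-- ===== CLAIM (what is proved, stated in full; the proofs are below) =====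
def Claim_equal_maxScore : Prop := ∀ (s : String), Dom_maxScore s → Spec_maxScore s (maxScore s)

-- ===== LEMMAS AND PROOFS =====

theorem scanl_take {α β : Type} (f : β → α → β) :
    ∀ (l : List α) (b : β) (k : Nat),
      (List.scanl f b l).take (k + 1) = List.scanl f b (l.take k) := by
  intro l
  induction l with
  | nil => intro b k; simp
  | cons a l ih =>
    intro b k
    cases k with
    | zero => simp [List.scanl_cons]
    | succ k => simp only [List.scanl_cons, List.take_succ_cons, ih]

theorem scanl_head {α β : Type} (f : β → α → β) (l : List α) (b : β) :
    List.scanl f b l = b :: (List.scanl f b l).drop 1 := by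
  cases l <;> simp [List.scanl_cons]

-- the common induction: A's live-counter fold equals B's index-carrying scan over the prefix table
theorem main_lemma (T : Int) :
    ∀ (l : List Char) (z i best : Int),
      (l.foldl
        (fun (st : Int × Int × Int) c =>
          let (left_zero, right_one, max_score) := st
          if c = '0' then
            (left_zero + 1, right_one, max max_score (left_zero + 1 + right_one))
          else
            (left_zero, right_one - 1, max max_score (left_zero + (right_one - 1))))
        (z, T - (i - z), best)).2.2
      = (((List.scanl (fun z c => z + (if c = '0' then 1 else 0)) z l).drop 1).foldl
          (fun (st : Int × Int) w => (max st.1 (w + T - (st.2 - w)), st.2 + 1))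
          (best, i + 1)).1 := by
  intro l
  induction l with
  | nil => intro z i best; simp
  | cons c l ih =>
    intro z i best
    by_cases hc : c = '0'
    · subst hc
      simp only [List.scanl_cons, List.drop_one, List.tail_cons, List.foldl_cons, if_pos]
      rw [scanl_head]
      rw [List.foldl_cons]
      have H := ih (z + 1) (i + 1) (max best (z + 1 + T - (i + 1 - (z + 1))))
      convert H using 4
      simp only [Prod.mk.injEq]
      refine ⟨trivial, by omega, ?_⟩
      congr 1
      omega
    · simp only [List.scanl_cons, List.drop_one, List.tail_cons, List.foldl_cons, if_neg hc]
      rw [scanl_head]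
      rw [List.foldl_cons]
      have H := ih (z + 0) (i + 1) (max best (z + 0 + T - (i + 1 - (z + 0))))
      convert H using 4
      simp only [Prod.mk.injEq]
      refine ⟨by omega, by omega, ?_⟩
      congr 1
      omega

-- B's slice of the full prefix table equals the (dropped) prefix table of s[:-1]
theorem slice_scanl_eq (cs : List Char) :
    PySem.List.slice (List.scanl (fun z c => z + (if c = '0' then (1:Int) else 0)) 0 cs)
        (some 1) (some (cs.length : Int))
      = (List.scanl (fun z c => z + (if c = '0' then (1:Int) else 0)) 0 cs.dropLast).drop 1 := by
  rw [PySem.List.slice_toNat _ (by norm_num) (by positivity)]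
  have h1 : ((1:Int)).toNat = 1 := rfl
  have h2 : ((cs.length : Int)).toNat = cs.length := Int.toNat_natCast _
  rw [h1, h2]
  rw [show List.take (cs.length - 1)
        (List.drop 1 (List.scanl (fun z c => z + (if c = '0' then (1:Int) else 0)) 0 cs))
      = List.drop 1 (List.take ((cs.length - 1) + 1)
          (List.scanl (fun z c => z + (if c = '0' then (1:Int) else 0)) 0 cs)) from by
        rw [List.drop_take]
        all_goals congr 1]
  rw [scanl_take]
  rw [List.dropLast_eq_take]

-- ===== VERDICT (by name: the statement is the Claim_ definition above) =====
theorem maxScore_spec : Claim_equal_maxScore := by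
  intro s _
  unfold Spec_maxScore maxScore maxScore_alt
  simp only []
  rw [show PySem.Str.len s = ((s.toList.length : Nat) : Int) from by
        simp [PySem.Str.len_eq]]
  rw [slice_scanl_eq s.toList]
  have := main_lemma (PySem.Str.count s "1") s.toList.dropLast 0 0 0
  simpa using this
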